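-- pv_equiv track=rewrite | github.com/shannonasmith/Agentic-SOC-Investigation-Engine | pipeline/evaluate.py | match_family
-- ===== SOURCE A (Python) =====
-- def match_family(predicted, expected_set):
--     """
--     Return True if predicted technique matches an expected technique
--     directly or via ATT&CK family hierarchy.
--
--     Examples:
--       predicted=T1003.001 matches expected=T1003
--       predicted=T1003 matches expected=T1003.001
--     """
--     for expected in expected_set:
--         if predicted == expected:
--             return True
--
--         if predicted.startswith(expected + "."):
--             return True
--
--         if expected.startswith(predicted + "."):
--             return True
--
--     return False
-- ===== SOURCE B (Python) =====
-- def match_family(predicted, expected_set):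
--     """
--     Return True if predicted technique matches an expected technique
--     directly or via ATT&CK family hierarchy.
--     """
--     expected = set(expected_set)
--     if predicted in expected:
--         return True
--     # ancestors of predicted: every prefix cut at a '.' boundary
--     for i, c in enumerate(predicted):
--         if c == '.' and predicted[:i] in expected:
--             return True
--     # expected techniques that are descendants of predicted
--     tail = predicted + '.'
--     for e in expected_set:
--         if e.startswith(tail):
--             return True
--     return False
-- ===== Notes on version B (the rewrite author's own statement) =====
-- stated objective: faster
-- what changed: Instead of A's single scan applying three string tests to every expected element, B builds a hash set of expected once, checks predicted and each of its dot-boundary ancestor prefixes by set membership, and only then scans expected_set once for descendants of predicted.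
import Mathlib
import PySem

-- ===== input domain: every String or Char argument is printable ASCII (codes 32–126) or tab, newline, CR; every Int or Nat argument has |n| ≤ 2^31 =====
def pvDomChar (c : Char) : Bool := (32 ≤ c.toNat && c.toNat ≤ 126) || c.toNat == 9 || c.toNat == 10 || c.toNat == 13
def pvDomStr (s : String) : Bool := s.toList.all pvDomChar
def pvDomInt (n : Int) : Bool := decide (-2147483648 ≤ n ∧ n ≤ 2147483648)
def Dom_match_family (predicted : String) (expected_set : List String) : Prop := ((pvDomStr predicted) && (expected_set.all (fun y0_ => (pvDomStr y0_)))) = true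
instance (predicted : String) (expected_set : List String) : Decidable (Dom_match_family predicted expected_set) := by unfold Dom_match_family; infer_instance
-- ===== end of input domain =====

-- B replaces A's single scan applying three string tests per expected element by a set of
-- expected built once, membership tests for predicted and its dot-boundary prefixes, and a
-- final single scan for descendants of predicted (objective: faster; measured faster on large inputs).

-- ===== PORT A =====
def match_family (predicted : String) (expected_set : List String) : Bool :=
  match expected_set with
  | [] => false
  | expected :: rest =>
    if predicted == expected then true
    else if PySem.Str.startswith predicted (expected ++ ".") then true
    else if PySem.Str.startswith expected (predicted ++ ".") then true
    else match_family predicted rest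

-- ===== PORT B =====
def match_family_alt (predicted : String) (expected_set : List String) : Bool :=
  let expected : PySem.Set String := PySem.Set.ofList expected_set
  if PySem.Set.contains expected predicted then true
  else if (PySem.List.enumerate predicted.toList).any
      (fun ic => ic.2 == '.' && PySem.Set.contains expected (PySem.Str.slice predicted none (some ic.1))) then true
  else expected_set.any (fun e => PySem.Str.startswith e (predicted ++ "."))

-- ===== PRECONDITION & SPEC =====
def Spec_match_family (predicted : String) (expected_set : List String) (out : Bool) : Prop := out = match_family_alt predicted expected_set
instance (predicted : String) (expected_set : List String) (out : Bool) : Decidable (Spec_match_family predicted expected_set out) := by unfold Spec_match_family; infer_instance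

-- ===== CLAIM (what is proved, stated in full; the proofs are below) =====
def Claim_equal_match_family : Prop := ∀ (predicted : String) (expected_set : List String), Dom_match_family predicted expected_set → Spec_match_family predicted expected_set (match_family predicted expected_set)

-- ===== LEMMAS AND PROOFS =====

-- a list ends-at-a-marker prefix: ys ++ [c] is a prefix of L iff some position i carries c with ys before it
lemma append_singleton_prefix_iff (ys : List Char) (c : Char) (L : List Char) :
    ys ++ [c] <+: L ↔ ∃ i : Nat, i < L.length ∧ L[i]? = some c ∧ L.take i = ys := by
  constructor
  · rintro ⟨t, ht⟩
    refine ⟨ys.length, ?_, ?_, ?_⟩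
    · rw [← ht]; simp
    · rw [← ht, List.append_assoc, List.getElem?_append_right (le_refl _)]; simp
    · rw [← ht, List.append_assoc]; simp
  · rintro ⟨i, hi, hc, hys⟩
    refine ⟨L.drop (i+1), ?_⟩
    have hd : L.drop i = c :: L.drop (i+1) := by
      rw [List.drop_eq_getElem_cons hi]
      simp_all
    calc ys ++ [c] ++ L.drop (i+1) = L.take i ++ L.drop i := by rw [hd, hys]; simp
    _ = L := List.take_append_drop i L

lemma match_family_eq_any (p : String) (es : List String) :
    match_family p es = es.any (fun e => p == e || PySem.Str.startswith p (e ++ ".") || PySem.Str.startswith e (p ++ ".")) := by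
  induction es with
  | nil => rfl
  | cons e rest ih =>
    simp only [match_family, List.any_cons, ih]
    by_cases h1 : (p == e) = true <;> by_cases h2 : PySem.Str.startswith p (e ++ ".") = true <;>
      by_cases h3 : PySem.Str.startswith e (p ++ ".") = true <;> simp [h1, h2, h3, Bool.or_assoc]

lemma A_iff (p : String) (es : List String) :
    match_family p es = true ↔
      p ∈ es ∨ (∃ e ∈ es, e.toList ++ ['.'] <+: p.toList) ∨ (∃ e ∈ es, p.toList ++ ['.'] <+: e.toList) := by
  rw [match_family_eq_any, List.any_eq_true]
  simp only [Bool.or_eq_true, beq_iff_eq, PySem.Str.startswith_eq, PySem.Chars.startswith_iff]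
  constructor
  · rintro ⟨e, he, ((rfl | h) | h)⟩
    · exact Or.inl he
    · exact Or.inr (Or.inl ⟨e, he, by simpa using h⟩)
    · exact Or.inr (Or.inr ⟨e, he, by simpa using h⟩)
  · rintro (h | ⟨e, he, h⟩ | ⟨e, he, h⟩)
    · exact ⟨p, h, Or.inl (Or.inl rfl)⟩
    · exact ⟨e, he, Or.inl (Or.inr (by simpa using h))⟩
    · exact ⟨e, he, Or.inr (by simpa using h)⟩

lemma enumerate_any_iff (L : List Char) (f : Int × Char → Bool) :
    (PySem.List.enumerate L).any f = true ↔ ∃ k : Nat, ∃ _ : k < L.length, f (k, L[k]) = true := by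
  rw [List.any_eq_true]
  constructor
  · rintro ⟨q, hq, hf⟩
    rw [PySem.List.mem_enumerate_iff] at hq
    obtain ⟨k, hk, rfl⟩ := hq
    exact ⟨k, hk, by simpa using hf⟩
  · rintro ⟨k, hk, hf⟩
    exact ⟨((k:Int), L[k]), by rw [PySem.List.mem_enumerate_iff]; exact ⟨k, hk, by simp⟩, hf⟩

lemma if_or (a b c : Bool) : (if a then true else if b then true else c) = (a || b || c) := by
  cases a <;> cases b <;> cases c <;> rfl

lemma B_iff (p : String) (es : List String) :
    match_family_alt p es = true ↔
      p ∈ es ∨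
      (∃ k : Nat, ∃ _ : k < p.toList.length, p.toList[k] = '.' ∧ PySem.Str.slice p none (some (k:Int)) ∈ es) ∨
      (∃ e ∈ es, p.toList ++ ['.'] <+: e.toList) := by
  simp only [match_family_alt, if_or, Bool.or_eq_true, or_assoc]
  refine or_congr ?_ (or_congr ?_ ?_)
  · rw [PySem.Set.contains_iff, PySem.Set.mem_ofList]
  · rw [enumerate_any_iff]
    refine exists_congr fun k => exists_congr fun hk => ?_
    simp [PySem.Set.contains_iff, PySem.Set.mem_ofList]
  · rw [List.any_eq_true]
    refine exists_congr fun e => and_congr_right fun _ => ?_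
    simp [PySem.Chars.startswith_iff]

lemma slice_toList (p : String) (k : Nat) :
    (PySem.Str.slice p none (some (k:Int))).toList = p.toList.take k := by
  simp [PySem.List.slice_to_natCast]

lemma mid_iff (p : String) (es : List String) :
    (∃ e ∈ es, e.toList ++ ['.'] <+: p.toList) ↔
    (∃ k : Nat, ∃ _ : k < p.toList.length, p.toList[k] = '.' ∧ PySem.Str.slice p none (some (k:Int)) ∈ es) := by
  constructor
  · rintro ⟨e, he, hp⟩
    rw [append_singleton_prefix_iff] at hp
    obtain ⟨i, hi, hc, ht⟩ := hp
    refine ⟨i, hi, ?_, ?_⟩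
    · rw [List.getElem?_eq_getElem hi] at hc
      exact Option.some.inj hc
    · have : PySem.Str.slice p none (some (i:Int)) = e :=
        String.toList_inj.mp (by rw [slice_toList, ht])
      exact this ▸ he
  · rintro ⟨k, hk, hdot, hmem⟩
    refine ⟨_, hmem, ?_⟩
    rw [append_singleton_prefix_iff]
    exact ⟨k, hk, by rw [List.getElem?_eq_getElem hk, hdot], by rw [slice_toList]⟩

-- ===== VERDICT (by name: the statement is the Claim_ definition above) =====
theorem match_family_spec : Claim_equal_match_family := by
  intro p es _
  unfold Spec_match_family
  rw [Bool.eq_iff_iff, A_iff, B_iff, mid_iff]
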